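-- pv_equiv track=rewrite | github.com/kimiakrs/Mono-Substitution | Task2-analysis.py | apply_ngram
-- ===== SOURCE A (Python) =====
-- def apply_ngram(text, mapping, n):
--     result = ""
--     i = 0
--     while i < len(text):
--         section = text[i:i+n]
--         if len(section) == n and section in mapping and section.isalpha():
--             result += mapping[section]
--             i += n
--         else:
--             result += text[i]
--             i += 1
--     return result
-- ===== SOURCE B (Python) =====
-- def apply_ngram(text, mapping, n):
--     # Match-jumping: instead of testing every position, leap from occurrence to
--     # occurrence using str.find on each eligible key; positions with no key
--     # are never inspected individually.
--     keys = [k for k in mapping if len(k) == n and k.isalpha()]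
--     if not keys:
--         return text
--     parts = []
--     pos = 0
--     while True:
--         hits = [j for j in (text.find(k, pos) for k in keys) if j != -1]
--         if not hits:
--             break
--         nxt = min(hits)
--         parts.append(text[pos:nxt])
--         parts.append(mapping[text[nxt:nxt + n]])
--         pos = nxt + n
--     parts.append(text[pos:])
--     return "".join(parts)
-- ===== Notes on version B (the rewrite author's own statement) =====
-- stated objective: faster
-- what changed: B replaces A's test-every-position scan with match-jumping: it collects the eligible keys (length n, alphabetic) once, returns text unchanged when there are none, and otherwise repeatedly uses str.find per key to leap directly to the next occurrence, emitting the untouched gap and the replacement as whole segments joined at the end, instead of A's per-position slice/membership/isalpha test and character-by-character string growth.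
import Mathlib
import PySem

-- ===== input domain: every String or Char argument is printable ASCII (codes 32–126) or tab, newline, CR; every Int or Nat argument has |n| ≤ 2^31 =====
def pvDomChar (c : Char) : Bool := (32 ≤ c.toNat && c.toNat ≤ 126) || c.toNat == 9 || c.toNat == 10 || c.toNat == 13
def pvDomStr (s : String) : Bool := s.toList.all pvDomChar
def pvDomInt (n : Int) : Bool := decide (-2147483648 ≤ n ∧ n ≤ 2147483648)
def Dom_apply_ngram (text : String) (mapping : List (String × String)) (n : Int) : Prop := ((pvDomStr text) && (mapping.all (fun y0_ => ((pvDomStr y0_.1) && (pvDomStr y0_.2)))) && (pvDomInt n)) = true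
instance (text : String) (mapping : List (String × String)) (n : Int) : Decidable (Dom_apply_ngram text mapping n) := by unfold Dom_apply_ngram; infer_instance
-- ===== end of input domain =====

-- B replaces A's per-position scan by match-jumping: it filters the eligible keys once and
-- repeatedly uses str.find to leap to the next occurrence, emitting whole untouched segments;
-- equal output is proved for all inputs in the domain.

-- ===== PORT A =====
-- A's while-loop over index i, accumulating `result`. fuel = cs.length is never exhausted
-- while i < cs.length: every iteration advances i by at least 1 (a hit needs a nonempty
-- alphabetic section with (length : Int) = n, hence n ≥ 1).
def pyApplyNgramLoop (cs : List Char) (d : PySem.Dict String String) (n : Int)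
    (i : Nat) (result : List Char) (fuel : Nat) : List Char :=
  match fuel with
  | 0 => result
  | fuel + 1 =>
    if h : i < cs.length then
      let sec := PySem.List.slice cs (some (i : Int)) (some ((i : Int) + n))  -- text[i:i+n]
      if ((sec.length : Int) == n) && d.contains (String.ofList sec) && PySem.Chars.strIsalpha sec then
        pyApplyNgramLoop cs d n (i + n.toNat) (result ++ (d.getD (String.ofList sec) "").toList) fuel
      else
        pyApplyNgramLoop cs d n (i + 1) (result ++ [cs[i]]) fuel
    else result

def apply_ngram (text : String) (mapping : List (String × String)) (n : Int) : String :=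
  let d := PySem.Dict.ofList mapping
  let cs := text.toList
  String.ofList (pyApplyNgramLoop cs d n 0 [] cs.length)

-- ===== PORT B =====
-- keys = [k for k in mapping if len(k) == n and k.isalpha()]
def pyEligibleKeys (mapping : List (String × String)) (n : Int) : List String :=
  ((PySem.Dict.ofList mapping).keys).filter
    (fun k => ((PySem.Str.len k : Int) == n) && PySem.Str.strIsalpha k)

-- B's match-jumping loop: hits = [text.find(k, pos) for k in keys, if != -1]; break when
-- empty (then parts.append(text[pos:])), else jump to nxt = min(hits). fuel =
-- cs.length + 1 is never exhausted: keys ≠ [] forces n ≥ 1, so pos strictly grows and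
-- stays ≤ cs.length.
def pyFindScan (cs : List Char) (d : PySem.Dict String String) (keys : List String) (n : Int)
    (pos : Nat) (parts : List (List Char)) (fuel : Nat) : List (List Char) :=
  match fuel with
  | 0 => parts
  | fuel + 1 =>
    let hits := (keys.map (fun k => PySem.Chars.findFrom cs k.toList (pos : Int) none)).filter
      (fun j => !(j == -1))
    match PySem.List.min? hits (fun j => j) with
    | none => parts ++ [cs.drop pos]                      -- break; then parts.append(text[pos:])
    | some nxt =>
      pyFindScan cs d keys n (nxt + n).toNat
        (parts ++ [PySem.List.slice cs (some (pos : Int)) (some nxt),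
                   (d.getD (String.ofList (PySem.List.slice cs (some nxt) (some (nxt + n)))) "").toList])
        fuel

def apply_ngram_alt (text : String) (mapping : List (String × String)) (n : Int) : String :=
  let keys := pyEligibleKeys mapping n
  if keys = [] then text
  else
    let d := PySem.Dict.ofList mapping
    let cs := text.toList
    String.ofList (pyFindScan cs d keys n 0 [] (cs.length + 1)).flatten

-- ===== PRECONDITION & SPEC =====
def Spec_apply_ngram (text : String) (mapping : List (String × String)) (n : Int) (out : String) : Prop := out = apply_ngram_alt text mapping n
instance (text : String) (mapping : List (String × String)) (n : Int) (out : String) : Decidable (Spec_apply_ngram text mapping n out) := by unfold Spec_apply_ngram; infer_instance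

-- ===== CLAIM (what is proved, stated in full; the proofs are below) =====
def Claim_equal_apply_ngram : Prop := ∀ (text : String) (mapping : List (String × String)) (n : Int), Dom_apply_ngram text mapping n → Spec_apply_ngram text mapping n (apply_ngram text mapping n)

-- ===== LEMMAS AND PROOFS =====

-- A's per-position condition, named for the proofs (definitionally the test in pyApplyNgramLoop).
def condA (cs : List Char) (d : PySem.Dict String String) (n : Int) (j : Nat) : Bool :=
  let sec := PySem.List.slice cs (some (j : Int)) (some ((j : Int) + n))
  ((sec.length : Int) == n) && d.contains (String.ofList sec) && PySem.Chars.strIsalpha sec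

lemma alpha_ne_nil (l : List Char) (h : PySem.Chars.strIsalpha l = true) : l ≠ [] := by
  intro he; subst he; simp [PySem.Chars.strIsalpha] at h

lemma mem_eligible (mapping : List (String × String)) (n : Int) (k : String) :
    k ∈ pyEligibleKeys mapping n ↔
      (PySem.Dict.ofList mapping).contains k = true ∧ (k.toList.length : Int) = n ∧
        PySem.Chars.strIsalpha k.toList = true := by
  unfold pyEligibleKeys
  rw [List.mem_filter, ← PySem.Dict.contains_iff_mem_keys]
  simp [pysem]

-- a prefix of a later tail is an infix of an earlier tail
lemma occ_infix (cs k : List Char) (pos j : Nat) (hj : pos ≤ j) (h : k <+: cs.drop j) :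
    k <:+: cs.drop pos := by
  have hsuff : cs.drop j <:+ cs.drop pos := by
    rw [show j = pos + (j - pos) by omega, ← List.drop_drop]
    exact List.drop_suffix _ _
  exact h.isInfix.trans hsuff.isInfix

lemma condA_iff (cs : List Char) (mapping : List (String × String)) (n : Int) (j : Nat) :
    condA cs (PySem.Dict.ofList mapping) n j = true ↔
      ∃ k ∈ pyEligibleKeys mapping n, k.toList <+: cs.drop j := by
  unfold condA
  simp only [Bool.and_eq_true, beq_iff_eq]
  constructor
  · rintro ⟨⟨hlen, hcont⟩, halpha⟩
    have hne := alpha_ne_nil _ halpha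
    have hlp : 0 < (PySem.List.slice cs (some (j:Int)) (some ((j:Int)+n))).length :=
      List.length_pos_iff.mpr hne
    refine ⟨String.ofList (PySem.List.slice cs (some (j:Int)) (some ((j:Int)+n))), ?_, ?_⟩
    · rw [mem_eligible]
      exact ⟨hcont, by rw [String.toList_ofList]; exact hlen,
        by rw [String.toList_ofList]; exact halpha⟩
    · rw [String.toList_ofList]
      conv_lhs => rw [show n = ((n.toNat : Nat) : Int) by omega]
      rw [PySem.List.slice_natCast_add]
      exact List.take_prefix _ _
  · rintro ⟨k, hk, hpre⟩
    rw [mem_eligible] at hk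
    obtain ⟨hcont, hlen, halpha⟩ := hk
    have hsec : PySem.List.slice cs (some (j:Int)) (some ((j:Int)+n)) = k.toList := by
      conv_lhs => rw [show n = ((n.toNat : Nat) : Int) by omega]
      rw [PySem.List.slice_natCast_add, show n.toNat = k.toList.length by omega]
      exact (List.prefix_iff_eq_take.mp hpre).symm
    rw [hsec]
    exact ⟨⟨hlen, by rw [String.ofList_toList]; exact hcont⟩, halpha⟩

lemma condA_false_of_no_occ (cs : List Char) (mapping : List (String × String)) (n : Int)
    (pos : Nat) (h : ∀ k ∈ pyEligibleKeys mapping n, ¬ k.toList <:+: cs.drop pos) :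
    ∀ j, pos ≤ j → condA cs (PySem.Dict.ofList mapping) n j = false := by
  intro j hj
  rw [← Bool.not_eq_true]
  intro hc
  obtain ⟨k, hk, hpre⟩ := (condA_iff cs mapping n j).mp hc
  exact h k hk (occ_infix cs k.toList pos j hj hpre)

lemma loopA_acc (cs : List Char) (d : PySem.Dict String String) (n : Int) :
    ∀ (fuel : Nat) (i : Nat) (result : List Char),
      pyApplyNgramLoop cs d n i result fuel = result ++ pyApplyNgramLoop cs d n i [] fuel := by
  intro fuel
  induction fuel with
  | zero => intro i result; simp [pyApplyNgramLoop]
  | succ fuel ih =>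
    intro i result
    simp only [pyApplyNgramLoop]
    split
    · split
      · rw [ih _ (result ++ _), ih _ ([] ++ _)]; simp
      · rw [ih _ (result ++ _), ih _ ([] ++ _)]; simp
    · simp

lemma n_pos_of_condA (cs : List Char) (d : PySem.Dict String String) (n : Int) (j : Nat)
    (h : condA cs d n j = true) : 1 ≤ n.toNat := by
  unfold condA at h
  simp only [Bool.and_eq_true, beq_iff_eq] at h
  obtain ⟨⟨hlen, -⟩, halpha⟩ := h
  have hne := alpha_ne_nil _ halpha
  have := List.length_pos_iff.mpr hne
  omega

lemma loopA_exit (cs : List Char) (d : PySem.Dict String String) (n : Int)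
    (i fuel : Nat) (h : cs.length ≤ i) : pyApplyNgramLoop cs d n i [] fuel = [] := by
  cases fuel with
  | zero => rfl
  | succ fuel => rw [pyApplyNgramLoop, dif_neg (by omega)]

lemma loopA_fuel (cs : List Char) (d : PySem.Dict String String) (n : Int) :
    ∀ (f1 f2 i : Nat), cs.length ≤ f1 + i → cs.length ≤ f2 + i →
      pyApplyNgramLoop cs d n i [] f1 = pyApplyNgramLoop cs d n i [] f2 := by
  intro f1
  induction f1 with
  | zero =>
    intro f2 i h1 h2
    rw [loopA_exit cs d n i 0 (by omega), loopA_exit cs d n i f2 (by omega)]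
  | succ f1 ih =>
    intro f2 i h1 h2
    by_cases hi : i < cs.length
    · obtain ⟨g, rfl⟩ : ∃ g, f2 = g + 1 := ⟨f2 - 1, by omega⟩
      simp only [pyApplyNgramLoop]
      rw [dif_pos hi, dif_pos hi]
      split
      · rename_i hc
        have hn : 1 ≤ n.toNat := n_pos_of_condA cs d n i hc
        rw [loopA_acc _ _ _ f1, loopA_acc _ _ _ g,
          ih g (i + n.toNat) (by omega) (by omega)]
      · rw [loopA_acc _ _ _ f1, loopA_acc _ _ _ g,
          ih g (i + 1) (by omega) (by omega)]
    · rw [loopA_exit cs d n i _ (by omega), loopA_exit cs d n i _ (by omega)]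

lemma loopA_copy_all (cs : List Char) (d : PySem.Dict String String) (n : Int) :
    ∀ (fuel pos : Nat), cs.length ≤ fuel + pos →
      (∀ j, pos ≤ j → condA cs d n j = false) →
      pyApplyNgramLoop cs d n pos [] fuel = cs.drop pos := by
  intro fuel
  induction fuel with
  | zero =>
    intro pos h1 _
    rw [pyApplyNgramLoop, List.drop_eq_nil_of_le (by omega)]
  | succ fuel ih =>
    intro pos h1 hcond
    by_cases hi : pos < cs.length
    · rw [pyApplyNgramLoop, dif_pos hi,
        if_neg (by rw [show (((((PySem.List.slice cs (some (pos:Int)) (some ((pos:Int) + n))).length : Int) == n) && (PySem.Dict.contains d (String.ofList (PySem.List.slice cs (some (pos:Int)) (some ((pos:Int) + n))))) && PySem.Chars.strIsalpha (PySem.List.slice cs (some (pos:Int)) (some ((pos:Int) + n)))) : Bool) = condA cs d n pos from rfl, hcond pos (le_refl _)]; simp)]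
      rw [loopA_acc, ih (pos + 1) (by omega) (fun j hj => hcond j (by omega)),
        List.nil_append, List.drop_eq_getElem_cons hi]
      rfl
    · rw [loopA_exit cs d n pos _ (by omega), List.drop_eq_nil_of_le (by omega)]

lemma loopA_seg (cs : List Char) (d : PySem.Dict String String) (n : Int) :
    ∀ (gap i fuel fuel' : Nat), cs.length ≤ fuel + i → cs.length ≤ fuel' + (i + gap) →
      i + gap ≤ cs.length →
      (∀ j, i ≤ j → j < i + gap → condA cs d n j = false) →
      pyApplyNgramLoop cs d n i [] fuel
        = (cs.drop i).take gap ++ pyApplyNgramLoop cs d n (i + gap) [] fuel' := by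
  intro gap
  induction gap with
  | zero =>
    intro i fuel fuel' h1 h2 h3 _
    simpa using loopA_fuel cs d n fuel fuel' i h1 (by omega)
  | succ gap ih =>
    intro i fuel fuel' h1 h2 h3 hcond
    have hi : i < cs.length := by omega
    obtain ⟨f, rfl⟩ : ∃ f, fuel = f + 1 := ⟨fuel - 1, by omega⟩
    rw [pyApplyNgramLoop, dif_pos hi,
      if_neg (by rw [show (((((PySem.List.slice cs (some (i:Int)) (some ((i:Int) + n))).length : Int) == n) && (PySem.Dict.contains d (String.ofList (PySem.List.slice cs (some (i:Int)) (some ((i:Int) + n))))) && PySem.Chars.strIsalpha (PySem.List.slice cs (some (i:Int)) (some ((i:Int) + n)))) : Bool) = condA cs d n i from rfl, hcond i (le_refl _) (by omega)]; simp)]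
    rw [loopA_acc, List.nil_append,
      ih (i + 1) f fuel' (by omega) (by omega) (by omega)
        (fun j hj1 hj2 => hcond j (by omega) (by omega))]
    rw [List.drop_eq_getElem_cons hi, List.take_succ_cons,
      show i + 1 + gap = i + (gap + 1) by omega]
    rfl

lemma loopA_hit (cs : List Char) (d : PySem.Dict String String) (n : Int)
    (i fuel : Nat) (hfuel : 1 ≤ fuel) (hi : i < cs.length)
    (h : condA cs d n i = true) :
    pyApplyNgramLoop cs d n i [] fuel
      = (d.getD (String.ofList (PySem.List.slice cs (some (i : Int)) (some ((i : Int) + n)))) "").toList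
        ++ pyApplyNgramLoop cs d n (i + n.toNat) [] (fuel - 1) := by
  obtain ⟨f, rfl⟩ : ∃ f, fuel = f + 1 := ⟨fuel - 1, by omega⟩
  rw [pyApplyNgramLoop, dif_pos hi,
    if_pos (by rw [show (((((PySem.List.slice cs (some (i:Int)) (some ((i:Int) + n))).length : Int) == n) && (PySem.Dict.contains d (String.ofList (PySem.List.slice cs (some (i:Int)) (some ((i:Int) + n))))) && PySem.Chars.strIsalpha (PySem.List.slice cs (some (i:Int)) (some ((i:Int) + n)))) : Bool) = condA cs d n i from rfl]; exact h)]
  rw [loopA_acc, List.nil_append]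
  rfl

lemma scan_eq_loop (cs : List Char) (mapping : List (String × String)) (n : Int) :
    ∀ (fuel pos : Nat) (parts : List (List Char)), pos ≤ cs.length → cs.length < fuel + pos →
      (pyFindScan cs (PySem.Dict.ofList mapping) (pyEligibleKeys mapping n) n pos parts fuel).flatten
        = parts.flatten ++ pyApplyNgramLoop cs (PySem.Dict.ofList mapping) n pos [] (cs.length - pos) := by
  intro fuel
  induction fuel with
  | zero => intro pos parts h1 h2; omega
  | succ fuel ih =>
    intro pos parts hple hlt
    rw [pyFindScan]
    rcases hmin : PySem.List.min? (((pyEligibleKeys mapping n).map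
        (fun k => PySem.Chars.findFrom cs k.toList (pos : Int) none)).filter
        (fun j => !(j == -1))) (fun j => j) with _ | nxt
    · -- no hit: every eligible key is absent from cs.drop pos
      simp only [hmin]
      have hnil := (PySem.List.min?_eq_none_iff _ _).mp hmin
      have hnocc : ∀ k ∈ pyEligibleKeys mapping n, ¬ k.toList <:+: cs.drop pos := by
        intro k hk
        refine (PySem.Chars.findFrom_natCast_eq_neg_one_iff cs k.toList pos hple).mp ?_
        by_contra hne
        have hmem : PySem.Chars.findFrom cs k.toList (pos : Int) none ∈
            (((pyEligibleKeys mapping n).map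
              (fun k => PySem.Chars.findFrom cs k.toList (pos : Int) none)).filter
              (fun j => !(j == -1))) := by
          rw [List.mem_filter]
          exact ⟨List.mem_map_of_mem hk, by simpa using hne⟩
        rw [hnil] at hmem
        exact absurd hmem List.not_mem_nil
      rw [loopA_copy_all cs (PySem.Dict.ofList mapping) n (cs.length - pos) pos (by omega)
        (condA_false_of_no_occ cs mapping n pos hnocc)]
      simp
    · -- a hit: nxt = min of the find results
      simp only [hmin]
      have hmem := PySem.List.min?_mem hmin
      rw [List.mem_filter] at hmem
      obtain ⟨hmemmap, hne1⟩ := hmem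
      obtain ⟨k0, hk0mem, hk0⟩ := List.mem_map.mp hmemmap
      have hne1' : PySem.Chars.findFrom cs k0.toList (pos : Int) none ≠ -1 := by
        rw [hk0]; simpa using hne1
      have hspec := PySem.Chars.findFrom_natCast_spec cs k0.toList pos hple hne1'
      rw [hk0] at hspec
      obtain ⟨hposle, hpre0, -⟩ := hspec
      have hnn : (0:Int) ≤ nxt := le_trans (by exact_mod_cast Nat.zero_le pos) hposle
      obtain ⟨-, hk0len, hk0alpha⟩ := (mem_eligible mapping n k0).mp hk0mem
      have hk0pos : 1 ≤ k0.toList.length :=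
        List.length_pos_iff.mpr (alpha_ne_nil _ hk0alpha)
      set m := nxt.toNat with hm
      have hmpos : pos ≤ m := by omega
      have hlenle : m + n.toNat ≤ cs.length := by
        have := hpre0.length_le
        rw [List.length_drop] at this
        omega
      have hcondm : condA cs (PySem.Dict.ofList mapping) n m = true :=
        (condA_iff cs mapping n m).mpr ⟨k0, hk0mem, hpre0⟩
      have hcondgap : ∀ j, pos ≤ j → j < m →
          condA cs (PySem.Dict.ofList mapping) n j = false := by
        intro j hj1 hj2
        rw [← Bool.not_eq_true]
        intro hc
        obtain ⟨k, hkmem, hkpre⟩ := (condA_iff cs mapping n j).mp hc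
        rcases eq_or_ne (PySem.Chars.findFrom cs k.toList (pos : Int) none) (-1) with heq | hne
        · exact absurd (occ_infix cs k.toList pos j hj1 hkpre)
            ((PySem.Chars.findFrom_natCast_eq_neg_one_iff cs k.toList pos hple).mp heq)
        · have hinfilter : PySem.Chars.findFrom cs k.toList (pos : Int) none ∈
              (((pyEligibleKeys mapping n).map
                (fun k => PySem.Chars.findFrom cs k.toList (pos : Int) none)).filter
                (fun j => !(j == -1))) := by
            rw [List.mem_filter]
            exact ⟨List.mem_map_of_mem hkmem, by simpa using hne⟩
          have hle := PySem.List.min?_isMin hmin _ hinfilter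
          have hkspec := PySem.Chars.findFrom_natCast_spec cs k.toList pos hple hne
          exact hkspec.2.2 j hj1 (by omega) hkpre
      have hn1 : 1 ≤ n.toNat := n_pos_of_condA cs (PySem.Dict.ofList mapping) n m hcondm
      have hposnat : (nxt + n).toNat = m + n.toNat := by omega
      rw [hposnat, ih (m + n.toNat) _ (by omega) (by omega)]
      rw [loopA_seg cs (PySem.Dict.ofList mapping) n (m - pos) pos (cs.length - pos)
        (cs.length - m) (by omega) (by omega) (by omega)
        (fun j hj1 hj2 => hcondgap j hj1 (by omega))]
      rw [show pos + (m - pos) = m by omega]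
      rw [loopA_hit cs (PySem.Dict.ofList mapping) n m (cs.length - m) (by omega) (by omega) hcondm]
      rw [loopA_fuel cs (PySem.Dict.ofList mapping) n (cs.length - m - 1)
        (cs.length - (m + n.toNat)) (m + n.toNat) (by omega) (by omega)]
      rw [show nxt = ((m : Nat) : Int) by omega, PySem.List.slice_natCast]
      simp only [List.flatten_append, List.flatten_cons, List.flatten_nil, List.append_nil,
        List.append_assoc]

-- ===== VERDICT (by name: the statement is the Claim_ definition above) =====
theorem apply_ngram_spec : Claim_equal_apply_ngram := by
  unfold Claim_equal_apply_ngram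
  intro text mapping n _
  unfold Spec_apply_ngram
  simp only [apply_ngram, apply_ngram_alt]
  by_cases hk : pyEligibleKeys mapping n = []
  · simp only [hk, if_true]
    rw [show pyApplyNgramLoop text.toList (PySem.Dict.ofList mapping) n 0 [] text.toList.length
          = text.toList.drop 0 from
        loopA_copy_all text.toList (PySem.Dict.ofList mapping) n text.toList.length 0 (by omega)
          (by
            intro j _
            rw [← Bool.not_eq_true]
            intro hc
            obtain ⟨k, hkmem, -⟩ := (condA_iff _ _ _ _).mp hc
            simp [hk] at hkmem)]
    simp
  · simp only [hk, if_false]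
    rw [scan_eq_loop text.toList mapping n (text.toList.length + 1) 0 [] (by omega) (by omega)]
    simp
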